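-- pv_equiv track=rewrite | github.com/ehudmi/Py_DI_ex | Week19/Day2/Challenge/Exercise.py | removeNotAlphaLetters
-- ===== SOURCE A (Python) =====
-- def removeNotAlphaLetters(final_str):
--     my_finalist = []
--     for char in final_str:
--         if char.isalpha():
--             my_finalist.append(char)
--         else:
--             if len(my_finalist) != 0 and my_finalist[-1] != " ":
--                 my_finalist.append(" ")
--
--     return "".join(my_finalist).strip()
-- ===== SOURCE B (Python) =====
-- from itertools import groupby
--
--
-- def removeNotAlphaLetters(final_str):
--     words = ["".join(g) for k, g in groupby(final_str, str.isalpha) if k]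
--     return " ".join(words)
-- ===== Notes on version B (the rewrite author's own statement) =====
-- stated objective: idiomatic
-- what changed: Replaced the per-character accumulator with its last-char-is-space sentinel check and final strip by grouping the string into maximal alpha runs with itertools.groupby and joining those words once with a single space separator.
import Mathlib
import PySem

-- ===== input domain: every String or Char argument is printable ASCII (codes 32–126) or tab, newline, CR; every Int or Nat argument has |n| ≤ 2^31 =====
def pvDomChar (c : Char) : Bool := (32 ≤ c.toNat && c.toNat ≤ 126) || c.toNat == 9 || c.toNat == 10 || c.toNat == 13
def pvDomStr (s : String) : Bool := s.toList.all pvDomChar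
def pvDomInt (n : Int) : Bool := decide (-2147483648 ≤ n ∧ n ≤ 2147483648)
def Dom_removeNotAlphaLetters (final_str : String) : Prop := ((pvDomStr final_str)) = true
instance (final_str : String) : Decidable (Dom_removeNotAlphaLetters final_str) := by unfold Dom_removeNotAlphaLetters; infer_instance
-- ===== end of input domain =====

-- B is more idiomatic: it groups the string into maximal alpha runs (itertools.groupby),
-- keeps the alpha groups as words and joins them with single spaces — no per-character
-- accumulator, no last-char sentinel check, no final strip.

-- ===== PORT A =====
def removeNotAlphaLetters (final_str : String) : String :=
  let my_finalist : List Char :=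
    final_str.toList.foldl (fun acc c =>
      if PySem.Chars.isalpha c then acc ++ [c]
      else if acc.length ≠ 0 ∧ PySem.List.pyGet? acc (-1) ≠ some ' ' then acc ++ [' ']
      else acc) []
  PySem.Str.strip (String.ofList my_finalist)

-- ===== PORT B =====
-- groupby(final_str, str.isalpha) keeping only key=True groups: the maximal alpha runs, in order.
def altWords (cs : List Char) : List (List Char) :=
  match cs with
  | [] => []
  | c :: rest =>
    if h : PySem.Chars.isalpha c then
      (c :: rest).takeWhile PySem.Chars.isalpha ::
        altWords ((c :: rest).dropWhile PySem.Chars.isalpha)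
    else
      altWords rest
termination_by cs.length
decreasing_by
  · simp only [List.dropWhile, h, List.length_cons]
    exact Nat.lt_succ_of_le (List.length_dropWhile_le _ _)
  · simp

def removeNotAlphaLetters_alt (final_str : String) : String :=
  PySem.Str.join " " ((altWords final_str.toList).map (fun w => String.ofList w))

-- ===== PRECONDITION & SPEC =====
def Spec_removeNotAlphaLetters (final_str : String) (out : String) : Prop := out = removeNotAlphaLetters_alt final_str
instance (final_str : String) (out : String) : Decidable (Spec_removeNotAlphaLetters final_str out) := by unfold Spec_removeNotAlphaLetters; infer_instance

-- ===== CLAIM (what is proved, stated in full; the proofs are below) =====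
def Claim_equal_removeNotAlphaLetters : Prop := ∀ (final_str : String), Dom_removeNotAlphaLetters final_str → Spec_removeNotAlphaLetters final_str (removeNotAlphaLetters final_str)

-- ===== LEMMAS AND PROOFS =====

-- A's loop body, named for the proofs.
def pvStep (acc : List Char) (c : Char) : List Char :=
  if PySem.Chars.isalpha c then acc ++ [c]
  else if acc.length ≠ 0 ∧ PySem.List.pyGet? acc (-1) ≠ some ' ' then acc ++ [' ']
  else acc

-- A's emitted characters as a function of the single bit of state the loop body reads:
-- "is the accumulator nonempty with a non-space last character".
def pvTc : Bool → List Char → List Char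
  | _, [] => []
  | b, c :: cs =>
    if PySem.Chars.isalpha c then c :: pvTc true cs
    else if b then ' ' :: pvTc false cs
    else pvTc false cs

-- whether A's list ends with a pending separator space: some alpha exists and the last char is not alpha
def pvTrail (cs : List Char) : Bool :=
  (cs.any PySem.Chars.isalpha) && !(cs.getLast?.elim false PySem.Chars.isalpha)

theorem pvAlpha_ne_space {c : Char} (h : PySem.Chars.isalpha c = true) : c ≠ ' ' := by
  intro rfl
  simp [PySem.Chars.isalpha, PySem.Chars.isupper, PySem.Chars.islower] at h

theorem pvGetLast_append (l : List Char) (x : Char) :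
    PySem.List.pyGet? (l ++ [x]) (-1) = some x := by
  simp [PySem.List.pyGet?, PySem.List.pyIdx?]

theorem pvFoldA (cs : List Char) : ∀ acc : List Char,
    cs.foldl pvStep acc = acc ++ pvTc (acc.length ≠ 0 && PySem.List.pyGet? acc (-1) != some ' ') cs := by
  induction cs with
  | nil => intro acc; simp [pvTc]
  | cons c cs ih =>
    intro acc
    by_cases hα : PySem.Chars.isalpha c = true
    · have h1 : pvStep acc c = acc ++ [c] := by simp [pvStep, hα]
      have h2 : ((acc ++ [c]).length ≠ 0 && PySem.List.pyGet? (acc ++ [c]) (-1) != some ' ') = true := by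
        simp [pvGetLast_append, pvAlpha_ne_space hα]
      simp only [List.foldl_cons, h1, ih, h2, pvTc, hα, if_pos, List.append_assoc, List.singleton_append]
    · by_cases hb : acc.length ≠ 0 ∧ PySem.List.pyGet? acc (-1) ≠ some ' '
      · have h1 : pvStep acc c = acc ++ [' '] := by
          simp only [pvStep, if_neg hα, if_pos hb]
        have h2 : ((acc ++ [' ']).length ≠ 0 && PySem.List.pyGet? (acc ++ [' ']) (-1) != some ' ') = false := by
          simp [pvGetLast_append]
        have hbT : (decide (acc.length ≠ 0) && PySem.List.pyGet? acc (-1) != some ' ') = true := by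
          simp [Bool.and_eq_true, hb.1, hb.2]
        rw [List.foldl_cons, h1, ih, hbT, h2]
        simp [pvTc, hα]
      · have h1 : pvStep acc c = acc := by
          simp only [pvStep, if_neg hα, if_neg hb]
        have hbF : (decide (acc.length ≠ 0) && PySem.List.pyGet? acc (-1) != some ' ') = false := by
          rcases Decidable.not_and_iff_not_or_not.mp hb with h | h
          · simp [show acc.length = 0 by omega]
          · simp [Decidable.not_not.mp h]
        rw [List.foldl_cons, h1, ih, hbF]
        simp [pvTc, hα]

theorem pvAlpha_not_space {c : Char} (h : PySem.Chars.isalpha c = true) :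
    PySem.Chars.isspace c = false := by
  simp [PySem.Chars.isalpha, PySem.Chars.isupper, PySem.Chars.islower, Char.le_def,
    UInt32.le_iff_toNat_le] at h
  simp only [PySem.Chars.isspace]
  simp
  omega

theorem pvTcTrue (cs : List Char) :
    pvTc true cs = cs.takeWhile PySem.Chars.isalpha ++
      (if cs.dropWhile PySem.Chars.isalpha = [] then []
       else ' ' :: pvTc false (cs.dropWhile PySem.Chars.isalpha)) := by
  induction cs with
  | nil => simp [pvTc]
  | cons c cs ih =>
    by_cases hα : PySem.Chars.isalpha c = true
    · simp [pvTc, hα, ih, List.takeWhile_cons, List.dropWhile_cons]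
    · simp [pvTc, hα, List.takeWhile_cons, List.dropWhile_cons]

theorem pvTcFalse_of_none (cs : List Char) (h : ∀ c ∈ cs, PySem.Chars.isalpha c = false) :
    pvTc false cs = [] := by
  induction cs with
  | nil => rfl
  | cons c cs ih =>
    have hc := h c (by simp)
    simp only [pvTc, hc, Bool.false_eq_true, if_false, if_neg]
    exact ih fun x hx => h x (by simp [hx])

theorem pvAltWords_nil (cs : List Char) :
    altWords cs = [] ↔ ∀ c ∈ cs, PySem.Chars.isalpha c = false := by
  induction cs using altWords.induct with
  | case1 => simp [altWords]
  | case2 c rest h ih =>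
    rw [altWords, dif_pos h]
    simp only [List.mem_cons]
    constructor
    · intro hcon; exact absurd hcon (by simp)
    · intro h2
      exact absurd (h2 c (Or.inl rfl)) (by simp [h])
  | case3 c rest h ih =>
    rw [altWords, dif_neg h]
    rw [ih]
    constructor
    · intro h2 x hx
      rcases List.mem_cons.mp hx with rfl | hx
      · simpa using h
      · exact h2 x hx
    · intro h2 x hx; exact h2 x (List.mem_cons.mpr (Or.inr hx))

theorem pvAltWords_mem (cs : List Char) :
    ∀ w ∈ altWords cs, w ≠ [] ∧ ∀ c ∈ w, PySem.Chars.isalpha c = true := by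
  induction cs using altWords.induct with
  | case1 => simp [altWords]
  | case2 c rest h ih =>
    rw [altWords, dif_pos h]
    intro w hw
    rcases List.mem_cons.mp hw with rfl | hw
    · constructor
      · simp [List.takeWhile_cons, h]
      · intro x hx; exact List.mem_takeWhile_imp hx
    · exact ih w hw
  | case3 c rest h ih =>
    rw [altWords, dif_neg h]
    exact ih

theorem pvDropWhile_id (p : Char → Bool) (l : List Char) (c : Char)
    (hh : l.head? = some c) (hc : p c = false) : l.dropWhile p = l := by
  cases l with
  | nil => rfl
  | cons a t =>
    simp only [List.head?_cons, Option.some.injEq] at hh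
    subst hh
    simp [List.dropWhile_cons, hc]

theorem pvConsLast (a : Char) (l : List Char) (h : l ≠ []) :
    (a :: l).getLast? = l.getLast? := by
  cases l with
  | nil => exact absurd rfl h
  | cons b t => simp [List.getLast?_cons_cons]

theorem pvMain (cs : List Char) :
    pvTc false cs = PySem.Chars.join [' '] (altWords cs) ++
      (if pvTrail cs then [' '] else []) := by
  induction cs using altWords.induct with
  | case1 => simp [pvTc, altWords, pvTrail, PySem.Chars.join_nil]
  | case3 c rest h ih =>
    have hα : PySem.Chars.isalpha c = false := by simpa using h
    rw [altWords, dif_neg h]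
    have hl : pvTc false (c :: rest) = pvTc false rest := by simp [pvTc, hα]
    have htr : pvTrail (c :: rest) = pvTrail rest := by
      cases rest with
      | nil => simp [pvTrail, hα]
      | cons b t =>
        unfold pvTrail
        rw [pvConsLast c (b :: t) (by simp)]
        simp [hα]
    rw [hl, ih, htr]
  | case2 c rest h ih =>
    set w := (c :: rest).takeWhile PySem.Chars.isalpha with hw
    set r := (c :: rest).dropWhile PySem.Chars.isalpha with hr
    have hwr : w ++ r = c :: rest := List.takeWhile_append_dropWhile
    have hwne : w ≠ [] := by simp [hw, List.takeWhile_cons, h]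
    have hwα : ∀ x ∈ w, PySem.Chars.isalpha x = true := fun x hx => List.mem_takeWhile_imp hx
    have hl : pvTc false (c :: rest) = w ++ (if r = [] then [] else ' ' :: pvTc false r) := by
      have h0 : pvTc false (c :: rest) = pvTc true (c :: rest) := by simp [pvTc, h]
      rw [h0, pvTcTrue]
    rw [altWords, dif_pos h, hl]
    rw [← hw, ← hr]
    by_cases hrn : r = []
    · have haw : altWords r = [] := by rw [hrn]; simp [altWords]
      have hcw : c :: rest = w := by rw [← hwr, hrn, List.append_nil]
      have htr : pvTrail (c :: rest) = false := by
        unfold pvTrail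
        rw [hcw, List.getLast?_eq_some_getLast hwne]
        simp [hwα _ (List.getLast_mem hwne)]
      simp [hrn, haw, htr, PySem.Chars.join_singleton, altWords]
    · have hany : (c :: rest).any PySem.Chars.isalpha = true := by simp [List.any_cons, h]
      have hlast : (c :: rest).getLast? = r.getLast? := by
        rw [← hwr]; exact List.getLast?_append_of_ne_nil _ hrn
      by_cases hawn : altWords r = []
      · have hallr : ∀ x ∈ r, PySem.Chars.isalpha x = false := (pvAltWords_nil r).mp hawn
        have htcr : pvTc false r = [] := pvTcFalse_of_none r hallr
        have htr : pvTrail (c :: rest) = true := by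
          unfold pvTrail
          rw [hlast, List.getLast?_eq_some_getLast hrn]
          simp [hany, hallr _ (List.getLast_mem hrn)]
        simp [hrn, hawn, htcr, htr, PySem.Chars.join_singleton]
      · have hanyr : r.any PySem.Chars.isalpha = true := by
          cases hx : r.any PySem.Chars.isalpha with
          | true => rfl
          | false =>
            exact absurd ((pvAltWords_nil r).mpr (by simpa [List.any_eq_false] using hx)) hawn
        have htrr : pvTrail (c :: rest) = pvTrail r := by
          unfold pvTrail
          rw [hlast, hany, hanyr]
        rw [if_neg hrn, ih, htrr]
        cases haw : altWords r with
        | nil => exact absurd haw hawn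
        | cons b l =>
          rw [PySem.Chars.join_cons_cons]
          simp

theorem pvJoinHead (ws : List (List Char)) (hne : ws ≠ [])
    (h : ∀ w ∈ ws, w ≠ [] ∧ ∀ c ∈ w, PySem.Chars.isalpha c = true) :
    ∃ c, (PySem.Chars.join [' '] ws).head? = some c ∧ PySem.Chars.isalpha c = true := by
  match ws with
  | [] => exact absurd rfl hne
  | [w] =>
    obtain ⟨hw, hα⟩ := h w (by simp)
    cases w with
    | nil => exact absurd rfl hw
    | cons a t =>
      exact ⟨a, by simp [PySem.Chars.join_singleton], hα a (by simp)⟩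
  | w :: b :: l =>
    obtain ⟨hw, hα⟩ := h w (by simp)
    cases w with
    | nil => exact absurd rfl hw
    | cons a t =>
      refine ⟨a, ?_, hα a (by simp)⟩
      rw [PySem.Chars.join_cons_cons]
      simp

theorem pvJoinLast (ws : List (List Char)) (hne : ws ≠ [])
    (h : ∀ w ∈ ws, w ≠ [] ∧ ∀ c ∈ w, PySem.Chars.isalpha c = true) :
    ∃ c, (PySem.Chars.join [' '] ws).getLast? = some c ∧ PySem.Chars.isalpha c = true := by
  induction ws with
  | nil => exact absurd rfl hne
  | cons w ws ih =>
    cases ws with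
    | nil =>
      obtain ⟨hw, hα⟩ := h w (by simp)
      refine ⟨w.getLast hw, ?_, hα _ (List.getLast_mem hw)⟩
      simpa [PySem.Chars.join_singleton] using List.getLast?_eq_some_getLast hw
    | cons b l =>
      obtain ⟨d, hd1, hd2⟩ := ih (by simp) (fun w hw => h w (by simp [hw]))
      refine ⟨d, ?_, hd2⟩
      rw [PySem.Chars.join_cons_cons, List.getLast?_append_of_ne_nil, hd1]
      intro hcon
      obtain ⟨hb, _⟩ := h b (by simp)
      obtain ⟨c0, hc0, _⟩ := pvJoinHead (b :: l) (by simp) (fun w hw => h w (by simp [hw]))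
      rw [hcon] at hc0
      simp at hc0

theorem pvStrip_self (l : List Char) (c d : Char)
    (hh : l.head? = some c) (hc : PySem.Chars.isspace c = false)
    (hl : l.getLast? = some d) (hd : PySem.Chars.isspace d = false) :
    PySem.Chars.strip l = l := by
  unfold PySem.Chars.strip PySem.Chars.lstrip PySem.Chars.rstrip
  rw [pvDropWhile_id _ l c hh hc]
  rw [pvDropWhile_id _ l.reverse d (by simpa using hl) hd]
  exact List.reverse_reverse l

theorem pvStrip_space (l : List Char) (c d : Char)
    (hh : l.head? = some c) (hc : PySem.Chars.isspace c = false)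
    (hl : l.getLast? = some d) (hd : PySem.Chars.isspace d = false) :
    PySem.Chars.strip (l ++ [' ']) = l := by
  have hne : l ≠ [] := by intro h; subst h; simp at hh
  unfold PySem.Chars.strip PySem.Chars.lstrip PySem.Chars.rstrip
  rw [pvDropWhile_id _ (l ++ [' ']) c (by cases l <;> simp_all) hc]
  rw [List.reverse_append]
  simp only [List.reverse_cons, List.reverse_nil, List.nil_append, List.singleton_append]
  rw [List.dropWhile_cons_of_pos (by simp [PySem.Chars.isspace])]
  rw [pvDropWhile_id _ l.reverse d (by simpa using hl) hd]
  exact List.reverse_reverse l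

-- ===== VERDICT (by name: the statement is the Claim_ definition above) =====
theorem removeNotAlphaLetters_spec : Claim_equal_removeNotAlphaLetters := by
  intro s _
  unfold Spec_removeNotAlphaLetters removeNotAlphaLetters removeNotAlphaLetters_alt
  apply String.toList_inj.mp
  have hfold : s.toList.foldl (fun acc c =>
      if PySem.Chars.isalpha c then acc ++ [c]
      else if acc.length ≠ 0 ∧ PySem.List.pyGet? acc (-1) ≠ some ' ' then acc ++ [' ']
      else acc) [] = pvTc false s.toList := pvFoldA s.toList []
  simp only [hfold, PySem.Str.toList_strip, PySem.Str.toList_join, String.toList_ofList,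
    List.map_map, Function.comp_def]
  simp only [show (" ".toList) = [' '] from rfl, List.map_id']
  rw [pvMain s.toList]
  set ws := altWords s.toList with hws
  by_cases hnil : ws = []
  · have hall : ∀ c ∈ s.toList, PySem.Chars.isalpha c = false := (pvAltWords_nil _).mp hnil
    have ht : pvTrail s.toList = false := by
      simp only [pvTrail, Bool.and_eq_false_iff]
      left
      simp only [List.any_eq_false]
      intro x hx; simp [hall x hx]
    simp [hnil, ht, PySem.Chars.join_nil, PySem.Chars.strip, PySem.Chars.lstrip, PySem.Chars.rstrip]
  · obtain ⟨c, hc1, hc2⟩ := pvJoinHead ws hnil (pvAltWords_mem s.toList)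
    obtain ⟨d, hd1, hd2⟩ := pvJoinLast ws hnil (pvAltWords_mem s.toList)
    by_cases ht : pvTrail s.toList = true
    · rw [ht, if_pos rfl]
      exact pvStrip_space _ c d hc1 (pvAlpha_not_space hc2) hd1 (pvAlpha_not_space hd2)
    · rw [Bool.not_eq_true] at ht
      rw [ht, if_neg (by simp)]
      simp only [List.append_nil]
      exact pvStrip_self _ c d hc1 (pvAlpha_not_space hc2) hd1 (pvAlpha_not_space hd2)
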